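-- pv_equiv track=rewrite | github.com/happy-xlf/0x3f_leetcode | 美团算法题/20240309/最大最小值.py | maxmin_def
-- ===== SOURCE A (Python) =====
-- def maxmin_def(l, r, a):
--     cnt = 0
--     sum = 0
--     for it in a:
--         if it!=0:
--             sum+=it
--         else:
--             cnt+=1
--     return sum+l*cnt, sum+r*cnt
-- ===== SOURCE B (Python) =====
-- def maxmin_def(l, r, a):
--     # View: the answer is simply the sum of a with every zero replaced
--     # by l (for the first component) resp. r (for the second).
--     return (sum(l if x == 0 else x for x in a),
--             sum(r if x == 0 else x for x in a))
-- ===== Notes on version B (the rewrite author's own statement) =====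
-- stated objective: simpler
-- what changed: Instead of maintaining a running sum and a zero counter and combining them as s+l*cnt / s+r*cnt, B views each component directly as the sum of the list with zeros substituted by l (resp. r) and computes two substituted sums, with no counter and no combination formula.
import Mathlib
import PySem

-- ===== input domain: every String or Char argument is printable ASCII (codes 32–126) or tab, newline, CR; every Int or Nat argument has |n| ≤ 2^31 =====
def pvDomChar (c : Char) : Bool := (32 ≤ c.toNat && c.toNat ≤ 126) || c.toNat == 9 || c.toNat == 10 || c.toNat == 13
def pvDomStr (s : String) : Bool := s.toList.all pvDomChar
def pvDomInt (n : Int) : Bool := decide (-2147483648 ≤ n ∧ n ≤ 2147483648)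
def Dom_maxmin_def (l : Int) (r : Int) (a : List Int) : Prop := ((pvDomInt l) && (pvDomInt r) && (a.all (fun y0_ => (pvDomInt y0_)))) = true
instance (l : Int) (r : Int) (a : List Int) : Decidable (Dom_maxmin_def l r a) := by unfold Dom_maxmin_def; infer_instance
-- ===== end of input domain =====

-- B drops A's counter/combination formula: each component is the sum of a with zeros substituted by l resp. r (simpler view).

-- ===== PORT A =====
-- loop over a with state (cnt, sum), branching on it != 0
def maxmin_def (l : Int) (r : Int) (a : List Int) : Int × Int :=
  let st := a.foldl (fun (p : Int × Int) it =>
    if it ≠ 0 then (p.1, p.2 + it) else (p.1 + 1, p.2)) (0, 0)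
  (st.2 + l * st.1, st.2 + r * st.1)

-- ===== PORT B =====
def maxmin_def_alt (l : Int) (r : Int) (a : List Int) : Int × Int :=
  ((a.map (fun x => if x = 0 then l else x)).sum,
   (a.map (fun x => if x = 0 then r else x)).sum)

-- ===== PRECONDITION & SPEC =====
def Spec_maxmin_def (l : Int) (r : Int) (a : List Int) (out : Int × Int) : Prop := out = maxmin_def_alt l r a
instance (l : Int) (r : Int) (a : List Int) (out : Int × Int) : Decidable (Spec_maxmin_def l r a out) := by unfold Spec_maxmin_def; infer_instance

-- ===== CLAIM (what is proved, stated in full; the proofs are below) =====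
def Claim_equal_maxmin_def : Prop := ∀ (l : Int) (r : Int) (a : List Int), Dom_maxmin_def l r a → Spec_maxmin_def l r a (maxmin_def l r a)

-- ===== LEMMAS AND PROOFS =====
-- A's loop state from (c0, s0) relates to B's substituted sum: s0 + v*c0 + sum(subst v a) = final s + v*(final c) term-wise
theorem maxmin_def_loop (a : List Int) (v c0 s0 : Int) :
    (let st := a.foldl (fun (p : Int × Int) it =>
      if it ≠ 0 then (p.1, p.2 + it) else (p.1 + 1, p.2)) (c0, s0)
     st.2 + v * st.1)
    = s0 + v * c0 + (a.map (fun x => if x = 0 then v else x)).sum := by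
  induction a generalizing c0 s0 with
  | nil => simp
  | cons x xs ih =>
    simp only [List.foldl_cons, List.map_cons, List.sum_cons]
    by_cases hx : x = 0
    · subst hx
      rw [if_neg (by simp), ih, if_pos rfl]
      ring
    · rw [if_pos hx, ih, if_neg hx]
      ring

-- ===== VERDICT (by name: the statement is the Claim_ definition above) =====
theorem maxmin_def_spec : Claim_equal_maxmin_def := by
  intro l r a _
  unfold Spec_maxmin_def maxmin_def maxmin_def_alt
  have hl := maxmin_def_loop a l 0 0
  have hr := maxmin_def_loop a r 0 0
  simp only at hl hr
  refine Prod.ext ?_ ?_ <;> dsimp only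
  · linarith [hl]
  · linarith [hr]
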